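-- pv_equiv track=rewrite | github.com/JiungChoi/2023-Baekjoon-Solve | baekjoon_G4_1229.py | get_hexes
-- ===== SOURCE A (Python) =====
-- def get_hexes(N):
--     x, now = 1, 0
--     ans = []
--     while now <= N:
--         now = x * (2*x - 1)
--         ans.append(now)
--         x += 1
--     return ans[:-1]
-- ===== SOURCE B (Python) =====
-- def get_hexes(N):
--     if N < 0:
--         return []
--     # integer square root of m = 8*N+1 by Newton's method (no imports available)
--     m = 8 * N + 1
--     r = m
--     while r * r > m:
--         r = (r + m // r) // 2
--     k = (r + 1) // 4  # largest x with x*(2*x-1) <= N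
--     return [x * (2 * x - 1) for x in range(1, k + 1)]
-- ===== Notes on version B (the rewrite author's own statement) =====
-- stated objective: alternative
-- what changed: B computes the number of hexagonal terms in closed form via an integer square root (Newton's method) of 8N+1 and emits them with a range comprehension, instead of A's iterate-past-the-bound-then-drop-the-last-element loop.
import Mathlib
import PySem

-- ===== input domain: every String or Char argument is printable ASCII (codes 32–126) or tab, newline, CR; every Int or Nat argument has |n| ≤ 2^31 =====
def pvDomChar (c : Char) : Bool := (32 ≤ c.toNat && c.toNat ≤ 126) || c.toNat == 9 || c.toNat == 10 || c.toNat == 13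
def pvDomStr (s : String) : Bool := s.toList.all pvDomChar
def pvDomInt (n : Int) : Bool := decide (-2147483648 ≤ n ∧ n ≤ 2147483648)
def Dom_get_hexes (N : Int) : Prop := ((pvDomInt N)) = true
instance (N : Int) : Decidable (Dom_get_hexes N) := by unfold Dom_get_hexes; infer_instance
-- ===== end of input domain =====

-- B determines the last index analytically (Newton integer sqrt of 8N+1) instead of
-- iterating past the bound and dropping the overshoot; alternative algorithm, same results.

-- ===== PORT A =====
-- the while loop of A; the fuel only makes the same computation total (the loop
-- exits on its own condition long before the fuel runs out)
def ghLoop (N : Int) : Nat → Int → Int → List Int → List Int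
  | 0, _, _, ans => ans
  | fuel+1, x, now, ans =>
      if now ≤ N then ghLoop N fuel (x + 1) (x * (2*x - 1)) (ans ++ [x * (2*x - 1)])
      else ans

def get_hexes (N : Int) : List Int :=
  (ghLoop N (N.toNat + 2) 1 0 []).dropLast   -- ans[:-1]

-- ===== PORT B =====
-- Newton iteration for the integer square root (Source B's while loop; fuel only for totality)
def ghNewton (m : Int) : Nat → Int → Int
  | 0, r => r
  | fuel+1, r =>
      if r * r > m then ghNewton m fuel (PySem.Int.floordiv (r + PySem.Int.floordiv m r) 2)
      else r

def get_hexes_alt (N : Int) : List Int :=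
  if N < 0 then []
  else
    let m := 8 * N + 1
    let r := ghNewton m m.toNat m
    let k := PySem.Int.floordiv (r + 1) 4
    (PySem.List.pyRange 1 (k + 1) 1).map (fun x => x * (2*x - 1))

-- ===== PRECONDITION & SPEC =====
def Spec_get_hexes (N : Int) (out : List Int) : Prop := out = get_hexes_alt N
instance (N : Int) (out : List Int) : Decidable (Spec_get_hexes N out) := by unfold Spec_get_hexes; infer_instance

-- ===== CLAIM (what is proved, stated in full; the proofs are below) =====
def Claim_equal_get_hexes : Prop := ∀ (N : Int), Dom_get_hexes N → Spec_get_hexes N (get_hexes N)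

-- ===== LEMMAS AND PROOFS =====

-- Newton's method returns an r with r*r ≤ m that dominates every nonnegative square root of m
theorem ghNewton_correct (m : Int) (hm : 0 < m) :
    ∀ (fuel : Nat) (r : Int), 1 ≤ r → r ≤ (fuel : Int) →
      (∀ t : Int, 0 ≤ t → t * t ≤ m → t ≤ r) →
      (ghNewton m fuel r) * (ghNewton m fuel r) ≤ m ∧
      (∀ t : Int, 0 ≤ t → t * t ≤ m → t ≤ ghNewton m fuel r) := by
  intro fuel
  induction fuel with
  | zero => intro r h1 h2 _; exfalso; omega
  | succ fuel ih =>
    intro r h1 h2 hdom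
    by_cases hgt : r * r > m
    · have hq : PySem.Int.floordiv m r = m / r := PySem.Int.floordiv_eq_ediv_of_pos (by omega)
      set q : Int := m / r with hqdef
      have hrq1 : q * r ≤ m := by rw [hqdef]; exact Int.ediv_mul_le m (show r ≠ 0 by omega)
      have hrq2 : m < (q + 1) * r := by
        rw [hqdef]; exact Int.lt_ediv_add_one_mul_self m (show 0 < r by omega)
      have hr'eq : PySem.Int.floordiv (r + PySem.Int.floordiv m r) 2 = (r + q) / 2 := by
        rw [hq]; exact PySem.Int.floordiv_eq_ediv_of_pos (by omega)
      set r' : Int := (r + q) / 2 with hr'def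
      -- r' dominates every nonnegative root t of m
      have hdom' : ∀ t : Int, 0 ≤ t → t * t ≤ m → t ≤ r' := by
        intro t ht htm
        by_contra hlt
        push_neg at hlt
        have h2r' : 2 * r' ≤ r + q ∧ r + q ≤ 2 * r' + 1 := by omega
        have h1 : r + q ≤ 2 * t - 1 := by omega
        have hq2 : r * q ≤ r * (2*t - 1 - r) :=
          mul_le_mul_of_nonneg_left (by omega) (by omega)
        have : m < t * t := by nlinarith [sq_nonneg (t - r)]
        omega
      have h1' : 1 ≤ r' := hdom' 1 (by omega) (by omega)
      have hqlt : q < r := by nlinarith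
      have hr'lt : r' < r := by omega
      have step : ghNewton m (fuel+1) r = ghNewton m fuel r' := by
        simp only [ghNewton, if_pos hgt, hr'eq]
      rw [step]
      exact ih r' h1' (by omega) hdom'
    · have step : ghNewton m (fuel+1) r = r := by simp only [ghNewton, if_neg hgt]
      rw [step]; exact ⟨by omega, hdom⟩

-- A's while loop appends x*(2x-1) for x = current-x .. K+1 and then stops, where
-- K is any bound with K*(2K-1) ≤ N < (K+1)*(2(K+1)-1)
theorem ghLoop_run (N K : Int) (hK0 : 0 ≤ K)
    (hKle : K * (2*K - 1) ≤ N) (hKlt : N < (K+1) * (2*(K+1) - 1)) :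
    ∀ (fuel : Nat) (x : Int) (ans : List Int), 1 ≤ x → x ≤ K + 2 →
      K + 3 - x ≤ (fuel : Int) →
      ghLoop N fuel x ((x-1) * (2*(x-1) - 1)) ans
        = ans ++ (PySem.List.pyRange x (K+2) 1).map (fun y => y * (2*y - 1)) := by
  intro fuel
  induction fuel with
  | zero => intro x ans h1 h2 h3; exfalso; omega
  | succ fuel ih =>
    intro x ans h1 h2 h3
    by_cases hx : x ≤ K + 1
    · -- loop condition holds: (x-1)*(2(x-1)-1) ≤ K*(2K-1) ≤ N by monotonicity
      have hcond : (x-1) * (2*(x-1) - 1) ≤ N := by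
        by_cases hx1 : x ≤ 1
        · have hxe : x = 1 := by omega
          subst hxe
          by_cases hk : K ≤ 0
          · have : K = 0 := by omega
            subst this; simpa using hKle
          · nlinarith
        · nlinarith [mul_nonneg (show (0:ℤ) ≤ K - x + 1 by omega)
            (show (0:ℤ) ≤ 2*K + 2*x - 3 by omega)]
      have step : ghLoop N (fuel+1) x ((x-1) * (2*(x-1) - 1)) ans
          = ghLoop N fuel (x+1) (x * (2*x - 1)) (ans ++ [x * (2*x - 1)]) := by
        simp only [ghLoop, if_pos hcond]
      rw [step]
      have hrec := ih (x+1) (ans ++ [x * (2*x - 1)]) (by omega) (by omega) (by omega)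
      have harg : ((x+1) - 1) * (2*((x+1) - 1) - 1) = x * (2*x - 1) := by ring
      rw [harg] at hrec
      rw [hrec, PySem.List.pyRange_one_cons (show x < K + 2 by omega)]
      simp
    · -- x = K+2: loop condition fails
      have hxeq : x = K + 2 := by omega
      have hcond : ¬ ((x-1) * (2*(x-1) - 1) ≤ N) := by
        subst hxeq; intro h; nlinarith
      have step : ghLoop N (fuel+1) x ((x-1) * (2*(x-1) - 1)) ans = ans := by
        simp only [ghLoop, if_neg hcond]
      rw [step, hxeq, PySem.List.pyRange_one_eq_nil (by omega)]
      simp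

-- ===== VERDICT (by name: the statement is the Claim_ definition above) =====
theorem get_hexes_spec : Claim_equal_get_hexes := by
  unfold Claim_equal_get_hexes Spec_get_hexes
  intro N _
  by_cases hN : N < 0
  · have : get_hexes N = [] := by
      have hfuel : N.toNat + 2 = 2 := by omega
      simp only [get_hexes, ghLoop, if_neg (show ¬ (0 ≤ N) by omega)]
      rfl
    rw [this, get_hexes_alt, if_pos hN]
  · push_neg at hN
    have hm : (0:Int) < 8 * N + 1 := by omega
    set m : Int := 8 * N + 1 with hmdef
    have hNewton := ghNewton_correct m hm m.toNat m (by omega) (by omega)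
      (by intro t ht htm; nlinarith)
    set r : Int := ghNewton m m.toNat m with hrdef
    obtain ⟨hr2, hrdom⟩ := hNewton
    have hr1 : 1 ≤ r := hrdom 1 (by omega) (by omega)
    have hrsucc : m < (r+1) * (r+1) := by
      by_contra h
      push_neg at h
      have := hrdom (r+1) (by omega) h
      omega
    have hkq : PySem.Int.floordiv (r + 1) 4 = (r + 1) / 4 :=
      PySem.Int.floordiv_eq_ediv_of_pos (by omega)
    set k : Int := (r + 1) / 4 with hkdef
    have hk4 : 4 * k ≤ r + 1 ∧ r + 1 ≤ 4 * k + 3 := by omega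
    have hk0 : 0 ≤ k := by omega
    -- k*(2k-1) ≤ N : (4k-1)^2 ≤ r^2 ≤ m = 8N+1
    have hKle : k * (2*k - 1) ≤ N := by nlinarith [sq_nonneg (4*k - 1 - r)]
    -- N < (k+1)*(2(k+1)-1) : 8N+1 = m < (r+1)^2 ≤ (4k+3)^2
    have hKlt : N < (k+1) * (2*(k+1) - 1) := by nlinarith [sq_nonneg (4*k + 3 - (r+1))]
    have hkN : k ≤ N := by nlinarith
    -- A's side
    have hA := ghLoop_run N k hk0 hKle hKlt (N.toNat + 2) 1 [] (by omega) (by omega) (by omega)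
    have h0 : ((1:Int) - 1) * (2*((1:Int)-1) - 1) = 0 := by ring
    rw [h0] at hA
    have hsplit : PySem.List.pyRange 1 (k+2) 1
        = PySem.List.pyRange 1 (k+1) 1 ++ [k+1] := by
      have := PySem.List.pyRange_one_succ_right (a := 1) (b := k+1) (by omega)
      simpa [show k + 1 + 1 = k + 2 by ring] using this
    have hAval : get_hexes N
        = (PySem.List.pyRange 1 (k+1) 1).map (fun y => y * (2*y - 1)) := by
      simp only [get_hexes, hA, List.nil_append, hsplit, List.map_append]
      simp
    -- B's side
    have hBval : get_hexes_alt N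
        = (PySem.List.pyRange 1 (k+1) 1).map (fun x => x * (2*x - 1)) := by
      simp only [get_hexes_alt, if_neg (show ¬ N < 0 by omega)]
      rw [← hmdef, ← hrdef, hkq]
    rw [hAval, hBval]
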